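-- pv_equiv track=rewrite | github.com/pypi-data/pypi-mirror-250 | packages/chmod/chmod-0.0.7.tar.gz/chmod-0.0.7/chmod/chmod.py | int_to_perm
-- ===== SOURCE A (Python) =====
-- def int_to_perm(x:int):
--     chmod_map_int={
--         0:"---",
--         1:"--x",
--         2:"-w-",
--         3:"-wx",
--         4:"r--",
--         5:"r-x",
--         6:"rw-",
--         7:"rwx"
--     }
--     o = x%10
--     g = int((x/10)%10)
--     u = int((x/100)%10)
--     l = [u,g,o]
--     s=""
--     for i in l:
--         if i in chmod_map_int.keys():
--                 s+=chmod_map_int[i]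
--         else:
--             return ("Incorrect value")
--     return s
-- ===== SOURCE B (Python) =====
-- def int_to_perm(x: int):
--     o = x % 10
--     g = int((x / 10) % 10)
--     u = int((x / 100) % 10)
--     if u > 7 or g > 7 or o > 7:
--         return "Incorrect value"
--     def rwx(d):
--         return ("r" if d & 4 else "-") + ("w" if d & 2 else "-") + ("x" if d & 1 else "-")
--     return rwx(u) + rwx(g) + rwx(o)
-- ===== Notes on version B (the rewrite author's own statement) =====
-- stated objective: idiomatic
-- what changed: Replaced the dict table plus accumulator loop with an early validity check and direct bit-arithmetic construction of each rwx block (r/w/x from bits 4/2/1), no lookup table and no loop.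
import Mathlib
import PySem

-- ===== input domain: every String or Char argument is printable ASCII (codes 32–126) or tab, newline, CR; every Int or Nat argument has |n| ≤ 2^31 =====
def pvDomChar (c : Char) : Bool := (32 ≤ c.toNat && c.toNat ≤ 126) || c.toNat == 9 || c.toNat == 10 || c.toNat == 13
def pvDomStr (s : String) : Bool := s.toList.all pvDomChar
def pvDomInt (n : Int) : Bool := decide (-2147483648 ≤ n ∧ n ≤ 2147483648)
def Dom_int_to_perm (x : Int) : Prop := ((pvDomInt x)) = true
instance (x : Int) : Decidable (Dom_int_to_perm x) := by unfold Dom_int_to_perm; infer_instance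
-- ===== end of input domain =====

-- B replaces A's dict table and accumulator loop by a validity check followed by direct
-- bit-arithmetic construction of each rwx block (idiomatic; same return value everywhere on Dom).

-- ===== PORT A =====
def chmodMapA : PySem.Dict Int String :=
  PySem.Dict.ofList
    [(0, "---"), (1, "--x"), (2, "-w-"), (3, "-wx"),
     (4, "r--"), (5, "r-x"), (6, "rw-"), (7, "rwx")]

-- the 'for i in l' loop: membership test in the dict's keys, accumulate, else early return
def permLoopA (m : PySem.Dict Int String) : List Int → String → String
  | [], s => s
  | i :: rest, s =>
    match m.get? i with
    | some v => permLoopA m rest (s ++ v)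
    | none => "Incorrect value"

-- NOTE on g, u: Python computes int((x/10)%10) and int((x/100)%10) with FLOAT division.
-- On Dom (|x| ≤ 2^31) the float result's error is < 2^-20, far below the 1/10 spacing of the
-- fractional parts, so it equals the exact floor-division form ported here (exact on Dom).
def int_to_perm (x : Int) : String :=
  let o := PySem.Int.mod x 10
  let g := PySem.Int.mod (PySem.Int.floordiv x 10) 10
  let u := PySem.Int.mod (PySem.Int.floordiv x 100) 10
  permLoopA chmodMapA [u, g, o] ""

-- ===== PORT B =====
def rwxBlock (d : Int) : String :=
  (if PySem.Int.band d 4 ≠ 0 then "r" else "-") ++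
  (if PySem.Int.band d 2 ≠ 0 then "w" else "-") ++
  (if PySem.Int.band d 1 ≠ 0 then "x" else "-")

def int_to_perm_alt (x : Int) : String :=
  let o := PySem.Int.mod x 10
  let g := PySem.Int.mod (PySem.Int.floordiv x 10) 10
  let u := PySem.Int.mod (PySem.Int.floordiv x 100) 10
  if u > 7 ∨ g > 7 ∨ o > 7 then "Incorrect value"
  else rwxBlock u ++ rwxBlock g ++ rwxBlock o

-- ===== PRECONDITION & SPEC =====
def Spec_int_to_perm (x : Int) (out : String) : Prop := out = int_to_perm_alt x
instance (x : Int) (out : String) : Decidable (Spec_int_to_perm x out) := by unfold Spec_int_to_perm; infer_instance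

-- ===== CLAIM (what is proved, stated in full; the proofs are below) =====
def Claim_equal_int_to_perm : Prop := ∀ (x : Int), Dom_int_to_perm x → Spec_int_to_perm x (int_to_perm x)

-- ===== LEMMAS AND PROOFS =====

-- the dict lookup agrees with the bit-built block on valid digits and fails exactly on 8, 9
theorem get?_map (d : Int) (h0 : 0 ≤ d) (h1 : d < 10) :
    chmodMapA.get? d = if d > 7 then none else some (rwxBlock d) := by
  interval_cases d <;> decide

theorem mod10_bounds (a : Int) : 0 ≤ PySem.Int.mod a 10 ∧ PySem.Int.mod a 10 < 10 := by
  rw [PySem.Int.mod_eq_emod_of_pos (by norm_num)]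
  exact ⟨Int.emod_nonneg a (by norm_num), Int.emod_lt_of_pos a (by norm_num)⟩

-- both programs depend on x only through the three digits u, g, o, each in [0, 10)
theorem digits_eq (u g o : Int) (hu0 : 0 ≤ u) (hu1 : u < 10) (hg0 : 0 ≤ g) (hg1 : g < 10)
    (ho0 : 0 ≤ o) (ho1 : o < 10) :
    permLoopA chmodMapA [u, g, o] "" =
      if u > 7 ∨ g > 7 ∨ o > 7 then "Incorrect value"
      else rwxBlock u ++ rwxBlock g ++ rwxBlock o := by
  simp only [permLoopA, get?_map u hu0 hu1, get?_map g hg0 hg1, get?_map o ho0 ho1]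
  by_cases h1 : u > 7 <;> by_cases h2 : g > 7 <;> by_cases h3 : o > 7 <;>
    simp [h1, h2, h3, String.append_assoc]

-- ===== VERDICT (by name: the statement is the Claim_ definition above) =====
theorem int_to_perm_spec : Claim_equal_int_to_perm := by
  intro x _
  unfold Spec_int_to_perm int_to_perm int_to_perm_alt
  exact digits_eq _ _ _ (mod10_bounds _).1 (mod10_bounds _).2 (mod10_bounds _).1
    (mod10_bounds _).2 (mod10_bounds _).1 (mod10_bounds _).2
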